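-- pv_equiv track=rewrite | github.com/KeKoParis/LOIS_1 | solve_numeric.py | build_pdnf_num
-- ===== SOURCE A (Python) =====
-- def get_row(expr):
--     row = list()
--     for i in expr:
--         if i == '0':
--             row.append(i)
--         if i == '1':
--             row.append(i)
--
--     return row
--
-- def build_pdnf_num(expr):
--     row = get_row(expr)
--     result = ""
--     left_br = -1
--
--     for i in range(len(row)):
--         if i == 0:
--             if row[i] == '1':
--                 result += "(!" + chr(i + 65) + "\\/"
--             else:
--                 result += "(" + chr(i + 65) + "\\/"
--         else:
--             if row[i] == '1':
--                 result += '!'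
--             result += chr(i + 65)
--             result += ")\\/"
--             left_br += 1
--
--     for i in range(left_br):
--         result = "(" + result
--
--     result = result[:-2]
--
--     return result
-- ===== SOURCE B (Python) =====
-- def build_pdnf_num(expr):
--     digits = [c for c in expr if c in '01']
--     lits = [('!' if c == '1' else '') + chr(i + 65) for i, c in enumerate(digits)]
--     if not lits:
--         return ""
--     result = lits[0]
--     for lit in lits[1:]:
--         result = '(' + result + '\\/' + lit + ')'
--     return result
-- ===== Notes on version B (the rewrite author's own statement) =====
-- stated objective: simpler
-- what changed: B builds the list of literals once and folds them left into the nested disjunction in a single pass, instead of A's index loop that emits a flat string, counts missing brackets, prepends them in a second loop and slices off a trailing separator.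
-- intended difference: On inputs containing exactly one '0'/'1' character A returns an unbalanced string with a stray opening parenthesis (e.g. '(A'), an artefact of its slice-off-the-separator scheme; B returns the bare literal 'A'/'!A', which is the intended single-literal formula. — e.g. on build_pdnf_num("0"): A returns "(A", B returns "A"
import Mathlib
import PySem

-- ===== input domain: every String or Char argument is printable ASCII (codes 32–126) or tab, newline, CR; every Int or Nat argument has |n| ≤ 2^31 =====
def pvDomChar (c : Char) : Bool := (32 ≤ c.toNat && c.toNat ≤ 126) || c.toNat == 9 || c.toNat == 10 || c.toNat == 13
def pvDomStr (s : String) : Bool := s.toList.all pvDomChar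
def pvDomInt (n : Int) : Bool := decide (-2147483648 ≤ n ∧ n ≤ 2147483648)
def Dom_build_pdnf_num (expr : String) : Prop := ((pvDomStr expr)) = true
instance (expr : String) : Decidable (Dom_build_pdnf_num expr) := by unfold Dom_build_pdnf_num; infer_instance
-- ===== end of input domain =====

-- B replaces A's flat-build-then-prepend-parens two-pass scheme by one left fold over the
-- precomputed literals; on single-literal inputs A's stray '(' is dropped (see D_ below).

-- ===== PORT A =====
-- get_row: collect the '0'/'1' characters of expr in order
def build_pdnf_num_row (expr : String) : List Char :=
  expr.toList.foldl (fun row i =>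
    let row := if i = '0' then row ++ [i] else row
    if i = '1' then row ++ [i] else row) []

-- the body of A's first loop (state = (result, left_br), i the loop index)
def pdnfStepA (row : List Char) (st : List Char × Int) (i : Nat) : List Char × Int :=
  if i = 0 then
    if row.getD i ' ' = '1' then
      (st.1 ++ ['(', '!', Char.ofNat (i + 65), '\\', '/'], st.2)
    else
      (st.1 ++ ['(', Char.ofNat (i + 65), '\\', '/'], st.2)
  else
    ((if row.getD i ' ' = '1' then st.1 ++ ['!'] else st.1)
       ++ [Char.ofNat (i + 65)] ++ [')', '\\', '/'], st.2 + 1)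

def build_pdnf_num (expr : String) : String :=
  let row := build_pdnf_num_row expr
  -- for i in range(len(row)): the index i is always in range, so getD is exact for row[i]
  let st := (List.range row.length).foldl (pdnfStepA row) ([], -1)
  -- for i in range(left_br): result = "(" + result   (range of a negative int is empty)
  let result := (List.range st.2.toNat).foldl (fun r _ => '(' :: r) st.1
  -- result[:-2] = drop the last two characters (exact also for strings shorter than 2)
  String.ofList result.dropLast.dropLast

-- ===== PORT B =====
-- the body of B's fold: result = '(' + result + '\/' + lit + ')'
def pdnfStepB (acc lit : List Char) : List Char :=
  '(' :: acc ++ '\\' :: '/' :: lit ++ [')']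

def build_pdnf_num_alt (expr : String) : String :=
  let digits := expr.toList.filter (fun c => c == '0' || c == '1')
  let lits := (PySem.List.enumerate digits).map
    (fun p => (if p.2 = '1' then ['!'] else []) ++ [Char.ofNat (p.1 + 65).toNat])
  match lits with
  | [] => ""
  | l0 :: rest => String.ofList (rest.foldl pdnfStepB l0)

-- ===== PRECONDITION & SPEC =====
-- On inputs with exactly one '0'/'1' character A returns an unbalanced string with a stray
-- opening parenthesis ('(A'), an artefact of its slice-off-the-separator scheme; B returns
-- the bare literal ('A'), the intended single-literal formula.
def D_build_pdnf_num (expr : String) : Prop :=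
  expr.toList.count '0' + expr.toList.count '1' = 1
instance (expr : String) : Decidable (D_build_pdnf_num expr) := by
  unfold D_build_pdnf_num; infer_instance

def Spec_build_pdnf_num (expr : String) (out : String) : Prop :=
  ¬ D_build_pdnf_num expr → out = build_pdnf_num_alt expr
instance (expr : String) (out : String) : Decidable (Spec_build_pdnf_num expr out) := by
  unfold Spec_build_pdnf_num; infer_instance

def pvDiffWitness_build_pdnf_num : String := "0"
def pvDiffWitnessOut_build_pdnf_num : String × String := ("(A", "A")

-- ===== CLAIM (what is proved, stated in full; the proofs are below) =====
def Claim_unchanged_build_pdnf_num : Prop :=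
  ∀ (expr : String), Dom_build_pdnf_num expr → Spec_build_pdnf_num expr (build_pdnf_num expr)
def Claim_changed_build_pdnf_num : Prop :=
  Dom_build_pdnf_num (pvDiffWitness_build_pdnf_num) ∧
  D_build_pdnf_num (pvDiffWitness_build_pdnf_num) ∧
  build_pdnf_num (pvDiffWitness_build_pdnf_num) = pvDiffWitnessOut_build_pdnf_num.1 ∧
  build_pdnf_num_alt (pvDiffWitness_build_pdnf_num) = pvDiffWitnessOut_build_pdnf_num.2 ∧
  pvDiffWitnessOut_build_pdnf_num.1 ≠ pvDiffWitnessOut_build_pdnf_num.2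
def Claim_exact_build_pdnf_num : Prop :=
  ∀ (expr : String), Dom_build_pdnf_num expr → D_build_pdnf_num expr →
    build_pdnf_num expr ≠ build_pdnf_num_alt expr

-- ===== LEMMAS AND PROOFS =====

-- the literal for position i of row, as a character list
def pdnfLit (row : List Char) (i : Nat) : List Char :=
  (if row.getD i ' ' = '1' then ['!'] else []) ++ [Char.ofNat (i + 65)]

theorem row_aux (l : List Char) (acc : List Char) :
    l.foldl (fun row i =>
      let row := if i = '0' then row ++ [i] else row
      if i = '1' then row ++ [i] else row) acc
      = acc ++ l.filter (fun c => c == '0' || c == '1') := by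
  induction l generalizing acc with
  | nil => simp
  | cons c t ih =>
    simp only [List.foldl_cons, List.filter_cons, ih]
    by_cases h0 : c = '0' <;> by_cases h1 : c = '1' <;> simp_all

-- get_row is the filter of the '0'/'1' characters
theorem pdnf_row_eq (expr : String) :
    build_pdnf_num_row expr = expr.toList.filter (fun c => c == '0' || c == '1') := by
  simpa using row_aux expr.toList []

-- closed form of A's first loop
theorem pdnf_foldA (row : List Char) (n : Nat) (hn : 1 ≤ n) :
    (List.range n).foldl (pdnfStepA row) ([], -1)
      = ('(' :: pdnfLit row 0 ++ '\\' :: '/' ::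
           (List.range' 1 (n - 1)).flatMap (fun i => pdnfLit row i ++ ')' :: '\\' :: '/' :: []),
         (n : Int) - 2) := by
  induction n with
  | zero => omega
  | succ m ih =>
    by_cases hm : m = 0
    · subst hm
      simp [List.range_succ, pdnfStepA, pdnfLit]
      split <;> simp
    · have h1 : 1 ≤ m := by omega
      rw [List.range_succ, List.foldl_append, ih h1]
      have hr : List.range' 1 (m + 1 - 1) = List.range' 1 (m - 1) ++ [m] := by
        have h2 : m + 1 - 1 = (m - 1) + 1 := by omega
        rw [h2, List.range'_concat]
        congr 1; simp; omega
      rw [hr]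
      simp only [List.foldl_cons, List.foldl_nil, pdnfStepA, if_neg hm, Prod.mk.injEq]
      refine ⟨?_, by push_cast; ring⟩
      simp only [List.flatMap_append, List.flatMap_cons, List.flatMap_nil, pdnfLit]
      split <;> simp

-- A's paren-prepending loop
theorem pdnf_prepend (k : Nat) (s : List Char) :
    (List.range k).foldl (fun r _ => '(' :: r) s = List.replicate k '(' ++ s := by
  induction k with
  | zero => simp
  | succ n ih => simp [List.range_succ, ih, List.replicate_succ]

-- dropping the two last characters past a long suffix
theorem dropLast_two_append (p q : List Char) (h : 2 ≤ q.length) :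
    (p ++ q).dropLast.dropLast = p ++ q.dropLast.dropLast := by
  have h1 : q ≠ [] := by intro e; simp [e] at h
  have h2 : q.dropLast ≠ [] := by
    intro e
    have := congrArg List.length e
    simp [List.length_dropLast] at this
    omega
  rw [List.dropLast_append_of_ne_nil h1, List.dropLast_append_of_ne_nil h2]

theorem flatMap_len (rest : List (List Char)) (h : rest ≠ []) :
    2 ≤ (rest.flatMap (fun a => a ++ ')' :: '\\' :: '/' :: [])).length := by
  cases rest with
  | nil => simp at h
  | cons x xs => simp; omega

-- closed form of B's fold
theorem pdnf_foldB (rest : List (List Char)) (l0 : List Char) (h : rest ≠ []) :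
    rest.foldl pdnfStepB l0
      = List.replicate (rest.length - 1) '(' ++ '(' :: l0 ++ '\\' :: '/' ::
          (rest.flatMap (fun a => a ++ ')' :: '\\' :: '/' :: [])).dropLast.dropLast := by
  induction rest generalizing l0 with
  | nil => simp at h
  | cons x xs ih =>
    cases xs with
    | nil => simp [pdnfStepB]
    | cons y ys =>
      rw [List.foldl_cons, ih (pdnfStepB l0 x) (by simp)]
      have key : ((x ++ ')' :: '\\' :: '/' :: []) ++
            ((y :: ys).flatMap (fun a => a ++ ')' :: '\\' :: '/' :: []))).dropLast.dropLast
          = (x ++ ')' :: '\\' :: '/' :: []) ++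
            ((y :: ys).flatMap (fun a => a ++ ')' :: '\\' :: '/' :: [])).dropLast.dropLast :=
        dropLast_two_append _ _ (flatMap_len _ (by simp))
      conv_rhs => rw [List.flatMap_cons]
      rw [key]
      simp [pdnfStepB, List.replicate_succ']

-- B's literal list in terms of pdnfLit
theorem pdnf_lits_eq (row : List Char) :
    (PySem.List.enumerate row).map
        (fun p => (if p.2 = '1' then ['!'] else []) ++ [Char.ofNat (p.1 + 65).toNat])
      = (List.range row.length).map (pdnfLit row) := by
  apply List.ext_getElem
  · simp [PySem.List.length_enumerate]
  · intro k h1 h2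
    simp only [List.getElem_map, List.getElem_range, PySem.List.getElem_enumerate, pdnfLit]
    have hk : k < row.length := by simpa [PySem.List.length_enumerate] using h1
    rw [List.getD_eq_getElem row ' ' hk]
    have h65 : ((0 : Int) + k + 65).toNat = k + 65 := by omega
    rw [h65]

-- D_'s count of '0's and '1's is the countP of the combined predicate
theorem count_bridge (l : List Char) :
    l.countP (fun c => c == '0' || c == '1') = l.count '0' + l.count '1' := by
  induction l with
  | nil => simp
  | cons c t ih =>
    by_cases h0 : c = '0' <;> by_cases h1 : c = '1' <;>
      simp_all <;> omega

theorem pdnf_main (expr : String)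
    (h1 : expr.toList.countP (fun c => c == '0' || c == '1') ≠ 1) :
    build_pdnf_num expr = build_pdnf_num_alt expr := by
  have hcnt : expr.toList.countP (fun c => c == '0' || c == '1')
      = (expr.toList.filter (fun c => c == '0' || c == '1')).length :=
    List.countP_eq_length_filter
  simp only [build_pdnf_num, build_pdnf_num_alt]
  rw [pdnf_row_eq expr, pdnf_lits_eq]
  set row := expr.toList.filter (fun c => c == '0' || c == '1') with hr
  rcases hlen : row.length with _ | m
  · -- no '0'/'1' characters: both return ""
    have : row = [] := List.length_eq_zero_iff.mp hlen
    simp [this]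
  · rcases m with _ | m
    · exact absurd (hcnt.trans hlen) h1
    · -- at least two literals
      rw [pdnf_foldA row (m + 1 + 1) (by omega), pdnf_prepend]
      have ht : ((m + 1 + 1 : Nat) : Int) - 2 = ((m : Nat) : Int) := by push_cast; ring
      rw [ht]
      have hrange : List.range (m + 1 + 1) = 0 :: List.range' 1 (m + 1) := by
        rw [List.range_eq_range']
        rfl
      rw [hrange]
      simp only [List.map_cons]
      have hrest : (List.range' 1 (m + 1)).map (pdnfLit row) ≠ [] := by simp
      rw [pdnf_foldB _ _ hrest, List.flatMap_map]
      have hG : 2 ≤ ((List.range' 1 (m + 1)).flatMap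
          (fun i => pdnfLit row i ++ ')' :: '\\' :: '/' :: [])).length := by
        have := flatMap_len ((List.range' 1 (m + 1)).map (pdnfLit row)) (by simp)
        rwa [List.flatMap_map] at this
      have e2 : List.replicate ((m : Int)).toNat '(' ++
            ('(' :: pdnfLit row 0 ++ '\\' :: '/' ::
              (List.range' 1 (m + 1 + 1 - 1)).flatMap
                (fun i => pdnfLit row i ++ ')' :: '\\' :: '/' :: []))
          = (List.replicate m '(' ++ '(' :: pdnfLit row 0 ++ ['\\', '/']) ++
            (List.range' 1 (m + 1)).flatMap
              (fun i => pdnfLit row i ++ ')' :: '\\' :: '/' :: []) := by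
        simp
      rw [e2, dropLast_two_append _ _ hG]
      simp [List.append_assoc]

theorem pdnf_one (expr : String)
    (h1 : expr.toList.countP (fun c => c == '0' || c == '1') = 1) :
    build_pdnf_num expr ≠ build_pdnf_num_alt expr := by
  have hcnt : expr.toList.countP (fun c => c == '0' || c == '1')
      = (expr.toList.filter (fun c => c == '0' || c == '1')).length :=
    List.countP_eq_length_filter
  simp only [build_pdnf_num, build_pdnf_num_alt]
  rw [pdnf_row_eq expr, pdnf_lits_eq]
  set row := expr.toList.filter (fun c => c == '0' || c == '1') with hr
  have hlen : row.length = 1 := by rw [← hcnt]; exact h1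
  rw [hlen, pdnf_foldA row 1 (le_refl 1)]
  have e1 : '(' :: pdnfLit row 0 ++ '\\' :: '/' ::
        (List.range' 1 (1 - 1)).flatMap (fun i => pdnfLit row i ++ ')' :: '\\' :: '/' :: [])
      = ('(' :: pdnfLit row 0) ++ ['\\', '/'] := by simp
  intro h
  rw [e1] at h
  simp at h
  have := congrArg (fun s => s.toList.length) h
  simp at this

-- ===== VERDICT (by name: the statement is the Claim_ definition above) =====
theorem build_pdnf_num_spec : Claim_unchanged_build_pdnf_num := by
  intro expr _ hD
  exact pdnf_main expr (fun e => hD ((count_bridge expr.toList).symm.trans e))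

theorem build_pdnf_num_changed : Claim_changed_build_pdnf_num := by
  unfold Claim_changed_build_pdnf_num; decide

theorem build_pdnf_num_tight : Claim_exact_build_pdnf_num := by
  intro expr _ hD
  exact pdnf_one expr ((count_bridge expr.toList).trans hD)
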